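-- pv_equiv track=rewrite | github.com/michaelliudl/CodingInterviewPython | com/leetcode/strings/03031_h_minimum time to revert word to initial state 2.py | minimumTimeToInitialState
-- ===== SOURCE A (Python) =====
-- def minimumTimeToInitialState(word: str, k: int) -> int:
--
--     def zFunc():
--         z = [0] * n
--         left = right = 0
--         for i in range(1, n):
--             if i < right:
--                 z[i] = min(right - i, z[i - left])
--             while (i + z[i]) < n and word[z[i]] == word[i + z[i]]:
--                 z[i] += 1
--             if i + z[i] > right:
--                 left = i
--                 right = i + z[i]
--         return z
--
--     n = len(word)
--     res = 1
--     maxOps = ((n - 1) // k) + 1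
--     z = zFunc()
--     for res in range(1, maxOps):
--         if z[res * k] >= (n - res * k):
--             return res
--     return maxOps
-- ===== SOURCE B (Python) =====
-- def minimumTimeToInitialState(word: str, k: int) -> int:
--     n = len(word)
--     maxOps = ((n - 1) // k) + 1
--     for res in range(1, maxOps):
--         if word[res * k:] == word[:n - res * k]:
--             return res
--     return maxOps
-- ===== Notes on version B (the rewrite author's own statement) =====
-- stated objective: simpler
-- what changed: Drops the Z-function preprocessing entirely: B tests each candidate res directly with one suffix/prefix slice comparison word[res*k:] == word[:n-res*k] (exactly what z[res*k] >= n-res*k encodes); A always pays the full O(n) Z-array build while B only compares slices for the O(n/k) candidates and stops at the first match.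
-- crash fix: On word='' with k=-1 A raises IndexError (it reads z[-1] of an empty z array) while B returns 1; Pre_ also excludes k=0, where both raise ZeroDivisionError. — e.g. on minimumTimeToInitialState("", -1): A raises IndexError, B returns 1
import Mathlib
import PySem

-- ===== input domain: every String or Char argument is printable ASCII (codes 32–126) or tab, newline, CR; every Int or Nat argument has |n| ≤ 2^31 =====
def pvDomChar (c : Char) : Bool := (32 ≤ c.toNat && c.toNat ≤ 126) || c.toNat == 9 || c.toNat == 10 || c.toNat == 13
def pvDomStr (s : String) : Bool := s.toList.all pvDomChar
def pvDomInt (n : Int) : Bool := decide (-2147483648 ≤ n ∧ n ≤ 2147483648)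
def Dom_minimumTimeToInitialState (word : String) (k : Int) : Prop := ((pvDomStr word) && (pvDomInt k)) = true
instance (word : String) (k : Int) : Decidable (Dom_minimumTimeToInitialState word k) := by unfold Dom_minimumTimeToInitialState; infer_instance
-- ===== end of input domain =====

-- B drops A's Z-function preprocessing and tests each candidate res with one direct
-- suffix/prefix comparison word[res*k:] == word[:n-res*k]; objective: simpler (the timing
-- run also measured B faster on its generated inputs, since B skips the full Z-array build).

-- ===== PORT A =====
-- the inner 'while (i + z[i]) < n and word[z[i]] == word[i + z[i]]: z[i] += 1' loop;
-- the two indexings are compared via getElem? (exact: under the loop guard and i ≥ 1 both indices are in range)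
def aZExtend (w : List Char) (i : Nat) (v : Nat) : Nat :=
  if h : i + v < w.length ∧ w[v]? = w[i + v]? then aZExtend w i (v + 1) else v
termination_by w.length - (i + v)
decreasing_by omega

-- one iteration of 'for i in range(1, n)' of zFunc, state (z, left, right)
def aZStep (w : List Char) (st : List Nat × Nat × Nat) (i : Nat) : List Nat × Nat × Nat :=
  let z := st.1
  let left := st.2.1
  let right := st.2.2
  let z1 := if i < right then z.set i (min (right - i) (z.getD (i - left) 0)) else z
  let zi := aZExtend w i (z1.getD i 0)
  let z2 := z1.set i zi
  if i + zi > right then (z2, i, i + zi) else (z2, left, right)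

-- zFunc(): z = [0]*n; for i in range(1, n): …  (range(1, n) = List.range' 1 (n-1))
def aZFunc (w : List Char) : List Nat :=
  ((List.range' 1 (w.length - 1)).foldl (aZStep w) (List.replicate w.length 0, 0, 0)).1

-- 'for res in range(1, maxOps): if z[res*k] >= n - res*k: return res' then 'return maxOps';
-- the index res*k is read via .toNat: exact under Pre_ (there k ≠ 0, and for k < 0 this loop is never entered)
def aLoop (z : List Nat) (n k maxOps : Int) : List Int → Int
  | [] => maxOps
  | res :: rest =>
      if n - res * k ≤ (z.getD (res * k).toNat 0 : Int) then res else aLoop z n k maxOps rest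

def minimumTimeToInitialState (word : String) (k : Int) : Int :=
  let w := word.toList
  let n : Int := w.length
  let maxOps := PySem.Int.floordiv (n - 1) k + 1
  let z := aZFunc w
  aLoop z n k maxOps (PySem.List.pyRange 1 maxOps 1)

-- ===== PORT B =====
-- 'for res in range(1, maxOps): if word[res*k:] == word[:n - res*k]: return res' then 'return maxOps'
def bLoop (w : List Char) (n k maxOps : Int) : List Int → Int
  | [] => maxOps
  | res :: rest =>
      if PySem.List.slice w (some (res * k)) none = PySem.List.slice w none (some (n - res * k))
      then res else bLoop w n k maxOps rest

def minimumTimeToInitialState_alt (word : String) (k : Int) : Int :=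
  let w := word.toList
  let n : Int := w.length
  let maxOps := PySem.Int.floordiv (n - 1) k + 1
  bLoop w n k maxOps (PySem.List.pyRange 1 maxOps 1)

-- ===== PRECONDITION & SPEC =====
-- Pre_ keeps the inputs on which A returns normally: it excludes k = 0 (ZeroDivisionError in
-- 'maxOps = ((n-1)//k)+1') and the single input shape word = '' with k = -1 (IndexError: A reads
-- z[-1] of the empty z array). On every other input, including all other negative k, A returns.
def Pre_minimumTimeToInitialState (word : String) (k : Int) : Prop :=
  k ≠ 0 ∧ (word.toList ≠ [] ∨ k ≠ -1)
instance (word : String) (k : Int) : Decidable (Pre_minimumTimeToInitialState word k) := by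
  unfold Pre_minimumTimeToInitialState; infer_instance

def pvWitness_minimumTimeToInitialState : String × Int := ("abacaba", 3)

-- On word = '' with k = -1 A raises IndexError (it reads z[-1] of an empty z array) while B returns 1.
def Raises_minimumTimeToInitialState (word : String) (k : Int) : Prop :=
  word.toList = [] ∧ k = -1
instance (word : String) (k : Int) : Decidable (Raises_minimumTimeToInitialState word k) := by
  unfold Raises_minimumTimeToInitialState; infer_instance
def pvRaiseWitness_minimumTimeToInitialState : String × Int := ("", -1)
def pvRaiseWitnessOut_minimumTimeToInitialState : Int := 1

def Spec_minimumTimeToInitialState (word : String) (k : Int) (out : Int) : Prop := out = minimumTimeToInitialState_alt word k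
instance (word : String) (k : Int) (out : Int) : Decidable (Spec_minimumTimeToInitialState word k out) := by unfold Spec_minimumTimeToInitialState; infer_instance

-- ===== CLAIM (what is proved, stated in full; the proofs are below) =====
def Claim_equal_minimumTimeToInitialState : Prop := ∀ (word : String) (k : Int), Dom_minimumTimeToInitialState word k → Pre_minimumTimeToInitialState word k → Spec_minimumTimeToInitialState word k (minimumTimeToInitialState word k)

def Claim_raises_minimumTimeToInitialState : Prop := (∀ (word : String) (k : Int), Dom_minimumTimeToInitialState word k → Raises_minimumTimeToInitialState word k → ¬ Pre_minimumTimeToInitialState word k) ∧ (Dom_minimumTimeToInitialState (pvRaiseWitness_minimumTimeToInitialState.1) (pvRaiseWitness_minimumTimeToInitialState.2) ∧ Raises_minimumTimeToInitialState (pvRaiseWitness_minimumTimeToInitialState.1) (pvRaiseWitness_minimumTimeToInitialState.2) ∧ minimumTimeToInitialState_alt (pvRaiseWitness_minimumTimeToInitialState.1) (pvRaiseWitness_minimumTimeToInitialState.2) = pvRaiseWitnessOut_minimumTimeToInitialState)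

-- ===== LEMMAS AND PROOFS =====

-- longest common prefix length of two character lists (z[i] of A's Z-function = lcp w (w.drop i))
def lcp : List Char → List Char → Nat
  | a :: s, b :: t => if a = b then lcp s t + 1 else 0
  | _, _ => 0

theorem lcp_le_right (s t : List Char) : lcp s t ≤ t.length := by
  induction s generalizing t with
  | nil => cases t <;> simp [lcp]
  | cons a s ih =>
    cases t with
    | nil => simp [lcp]
    | cons b t =>
      simp only [lcp, List.length_cons]
      split
      · exact Nat.succ_le_succ (ih t)
      · exact Nat.zero_le _

theorem lcp_getElem? (s t : List Char) (m : Nat) (hm : m < lcp s t) : s[m]? = t[m]? := by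
  induction s generalizing t m with
  | nil => cases t <;> simp [lcp] at hm
  | cons a s ih =>
    cases t with
    | nil => simp [lcp] at hm
    | cons b t =>
      simp only [lcp] at hm
      split at hm
      · cases m with
        | zero => simp_all
        | succ m => simpa using ih t m (by omega)
      · omega

theorem le_lcp_of_forall (s t : List Char) (v : Nat) (hv : v ≤ t.length)
    (h : ∀ m, m < v → s[m]? = t[m]?) : v ≤ lcp s t := by
  induction v generalizing s t with
  | zero => exact Nat.zero_le _
  | succ v ih =>
    cases t with
    | nil => simp at hv
    | cons b t =>
      cases s with
      | nil => simpa using h 0 (by omega)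
      | cons a s =>
        have h0 : a = b := by simpa using h 0 (by omega)
        simp only [lcp]
        rw [if_pos h0]
        have := ih s t (by simpa using hv) (fun m hm => by simpa using h (m + 1) (by omega))
        omega

theorem aZExtend_eq (w : List Char) (i v : Nat) (hv : v ≤ lcp w (w.drop i)) :
    aZExtend w i v = lcp w (w.drop i) := by
  induction hd : lcp w (w.drop i) - v generalizing v with
  | zero =>
    have hveq : v = lcp w (w.drop i) := by omega
    rw [aZExtend, dif_neg]
    · exact hveq
    · rintro ⟨hlt, heq⟩
      have hdl : (w.drop i).length = w.length - i := List.length_drop ..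
      have hvt : v < (w.drop i).length := by omega
      have hnext : v + 1 ≤ lcp w (w.drop i) := by
        apply le_lcp_of_forall w (w.drop i) (v + 1) (by omega)
        intro m hm
        rcases Nat.lt_succ_iff_lt_or_eq.mp hm with hm' | hm'
        · exact lcp_getElem? _ _ m (by omega)
        · subst hm'; rw [heq, List.getElem?_drop]
      omega
  | succ d ih =>
    have hvlt : v < lcp w (w.drop i) := by omega
    have h1 : w[v]? = (w.drop i)[v]? := lcp_getElem? _ _ v hvlt
    have hvt : v < (w.drop i).length := lt_of_lt_of_le hvlt (lcp_le_right _ _)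
    have hdl : (w.drop i).length = w.length - i := List.length_drop ..
    have hlen : i + v < w.length := by omega
    rw [aZExtend, dif_pos ⟨hlen, by rw [h1, List.getElem?_drop]⟩]
    exact ih (v + 1) (by omega) (by omega)

-- the invariant of zFunc's main loop at the start of iteration i
def ZInv (w : List Char) (i : Nat) (st : List Nat × Nat × Nat) : Prop :=
  st.1.length = w.length ∧
  (∀ j, 1 ≤ j → j < i → st.1.getD j 0 = lcp w (w.drop j)) ∧
  (∀ j, i ≤ j → st.1.getD j 0 = 0) ∧
  st.2.1 ≤ st.2.2 ∧ st.2.2 ≤ w.length ∧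
  (st.2.2 ≤ i ∨ (1 ≤ st.2.1 ∧ st.2.1 < i)) ∧
  (∀ m, m < st.2.2 - st.2.1 → w[st.2.1 + m]? = w[m]?)

theorem getD_set_self (z : List Nat) (i x : Nat) (h : i < z.length) :
    (z.set i x).getD i 0 = x := by
  simp [List.getD_eq_getElem?_getD, h]

theorem getD_set_ne (z : List Nat) (i j x : Nat) (h : j ≠ i) :
    (z.set i x).getD j 0 = z.getD j 0 := by
  simp [List.getD_eq_getElem?_getD, Ne.symm h]

theorem getD_replicate (n j : Nat) : (List.replicate n (0 : Nat)).getD j 0 = 0 := by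
  simp [List.getD_eq_getElem?_getD, List.getElem?_replicate]
  split <;> rfl

theorem aZStep_inv (w : List Char) (i : Nat) (st : List Nat × Nat × Nat)
    (h : ZInv w i st) (h1 : 1 ≤ i) (h2 : i < w.length) : ZInv w (i + 1) (aZStep w st i) := by
  obtain ⟨z, l, r⟩ := st
  simp only [ZInv] at h
  obtain ⟨hlen, hzlt, hzge, hlr, hrn, hdisj, hbox⟩ := h
  have hdl : (w.drop i).length = w.length - i := List.length_drop ..
  have hlcp_le : lcp w (w.drop i) ≤ w.length - i := by
    have := lcp_le_right w (w.drop i); omega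
  set L := lcp w (w.drop i) with hLdef
  have key : aZExtend w i
      ((if i < r then z.set i (min (r - i) (z.getD (i - l) 0)) else z).getD i 0) = L := by
    by_cases hir : i < r
    · have hll : 1 ≤ l ∧ l < i := by
        rcases hdisj with h' | h'
        · omega
        · exact h'
      have hzil : z.getD (i - l) 0 = lcp w (w.drop (i - l)) := hzlt _ (by omega) (by omega)
      have hv0 : min (r - i) (z.getD (i - l) 0) ≤ L := by
        apply le_lcp_of_forall w (w.drop i) _ (by have := min_le_left (r - i) (z.getD (i - l) 0); omega)
        intro m hm
        have hm1 : m < r - i := by have := min_le_left (r - i) (z.getD (i - l) 0); omega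
        have hm2 : m < lcp w (w.drop (i - l)) := by
          have := min_le_right (r - i) (z.getD (i - l) 0); omega
        rw [List.getElem?_drop]
        have e1 : w[m]? = w[(i - l) + m]? := by
          have e := lcp_getElem? w (w.drop (i - l)) m hm2
          rwa [List.getElem?_drop] at e
        have e2 : w[l + ((i - l) + m)]? = w[(i - l) + m]? := hbox _ (by omega)
        have e3 : l + ((i - l) + m) = i + m := by omega
        rw [e1, ← e2, e3]
      rw [if_pos hir, getD_set_self _ _ _ (by omega)]
      exact aZExtend_eq _ _ _ hv0
    · rw [if_neg hir, hzge i le_rfl]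
      exact aZExtend_eq _ _ _ (Nat.zero_le _)
  have hz2 : (if i < r then z.set i (min (r - i) (z.getD (i - l) 0)) else z).set i L
      = z.set i L := by
    split
    · rw [List.set_set]
    · rfl
  have f1 : (z.set i L).length = w.length := by simp [hlen]
  have f2 : ∀ j, 1 ≤ j → j < i + 1 → (z.set i L).getD j 0 = lcp w (w.drop j) := by
    intro j hj1 hj2
    by_cases hji : j = i
    · subst hji; rw [getD_set_self _ _ _ (by omega)]
    · rw [getD_set_ne _ _ _ _ hji]; exact hzlt j hj1 (by omega)
  have f3 : ∀ j, i + 1 ≤ j → (z.set i L).getD j 0 = 0 := by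
    intro j hj
    rw [getD_set_ne _ _ _ _ (by omega)]; exact hzge j (by omega)
  have fbox : ∀ m, m < (i + L) - i → w[i + m]? = w[m]? := by
    intro m hm
    have e := lcp_getElem? w (w.drop i) m (by omega)
    rw [List.getElem?_drop] at e
    exact e.symm
  simp only [aZStep, key, hz2]
  by_cases hif : i + L > r
  · rw [if_pos hif]
    simp only [ZInv]
    exact ⟨f1, f2, f3, by omega, by omega, Or.inr ⟨h1, by omega⟩, fbox⟩
  · rw [if_neg hif]
    simp only [ZInv]
    refine ⟨f1, f2, f3, hlr, hrn, ?_, hbox⟩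
    rcases hdisj with h' | h'
    · exact Or.inl (by omega)
    · exact Or.inr ⟨h'.1, by omega⟩

theorem zfold (w : List Char) : ∀ (m i : Nat) (st : List Nat × Nat × Nat), 1 ≤ i →
    i + m = w.length → ZInv w i st → ZInv w w.length ((List.range' i m).foldl (aZStep w) st) := by
  intro m
  induction m with
  | zero =>
    intro i st hi hm h
    simpa [← hm] using h
  | succ m ih =>
    intro i st hi hm h
    rw [List.range'_succ, List.foldl_cons]
    exact ih (i + 1) _ (by omega) (by omega) (aZStep_inv w i st h hi (by omega))

theorem aZFunc_getD (w : List Char) (j : Nat) (hj1 : 1 ≤ j) (hjn : j < w.length) :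
    (aZFunc w).getD j 0 = lcp w (w.drop j) := by
  have hinit : ZInv w 1 (List.replicate w.length 0, 0, 0) := by
    simp only [ZInv]
    refine ⟨by simp, ?_, ?_, by omega, by omega, Or.inl (by omega), ?_⟩
    · intro j hj1 hj2; omega
    · intro j _; exact getD_replicate ..
    · intro m hm; exact absurd hm (by omega)
  have hfin := zfold w (w.length - 1) 1 _ (by omega) (by omega) hinit
  exact hfin.2.1 j hj1 hjn

-- the two loop conditions agree: z[idx] ≥ n - idx  ↔  w[idx:] = w[:n-idx]  (1 ≤ idx < n)
theorem cond_iff (w : List Char) (idx : Nat) (h1 : 1 ≤ idx) (h2 : idx < w.length) :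
    ((w.length : Int) - idx ≤ ((aZFunc w).getD idx 0 : Int)
      ↔ w.drop idx = w.take (w.length - idx)) := by
  have hz := aZFunc_getD w idx h1 h2
  have hdl : (w.drop idx).length = w.length - idx := List.length_drop ..
  have hle : lcp w (w.drop idx) ≤ w.length - idx := by
    have := lcp_le_right w (w.drop idx); omega
  rw [hz]
  constructor
  · intro hcond
    apply List.ext_getElem?
    intro m
    by_cases hm : m < w.length - idx
    · rw [List.getElem?_take, if_pos hm]
      exact (lcp_getElem? w (w.drop idx) m (by omega)).symm
    · rw [List.getElem?_eq_none (by omega : (w.drop idx).length ≤ m),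
        List.getElem?_eq_none (by simp [List.length_take]; omega)]
  · intro heq
    have hge : w.length - idx ≤ lcp w (w.drop idx) := by
      apply le_lcp_of_forall _ _ _ (by omega)
      intro m hm
      rw [heq, List.getElem?_take, if_pos hm]
    omega

theorem loops_eq (w : List Char) (k maxOps : Int) (L : List Int)
    (hL : ∀ res ∈ L, 1 ≤ res ∧ 1 ≤ res * k ∧ res * k ≤ (w.length : Int) - 1) :
    aLoop (aZFunc w) (w.length : Int) k maxOps L = bLoop w (w.length : Int) k maxOps L := by
  induction L with
  | nil => rfl
  | cons res rest ih =>
    obtain ⟨hr1, hrk1, hrk2⟩ := hL res (List.mem_cons_self ..)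
    have hcast : ((res * k).toNat : Int) = res * k := Int.toNat_of_nonneg (by omega)
    have hi1 : 1 ≤ (res * k).toNat := by omega
    have hi2 : (res * k).toNat < w.length := by omega
    have hcond : ((w.length : Int) - res * k ≤ ((aZFunc w).getD (res * k).toNat 0 : Int))
        ↔ (PySem.List.slice w (some (res * k)) none
            = PySem.List.slice w none (some ((w.length : Int) - res * k))) := by
      rw [PySem.List.slice_from w (by omega), PySem.List.slice_to w (by omega)]
      have htn : ((w.length : Int) - res * k).toNat = w.length - (res * k).toNat := by omega
      rw [htn]
      have := cond_iff w (res * k).toNat hi1 hi2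
      rw [hcast] at this
      exact this
    simp only [aLoop, bLoop]
    exact if_congr hcond rfl (ih (fun r hr => hL r (List.mem_cons_of_mem _ hr)))

-- ===== VERDICT (by name: the statement is the Claim_ definition above) =====
theorem minimumTimeToInitialState_spec : Claim_equal_minimumTimeToInitialState := by
  intro word k _ hpre
  obtain ⟨hk0, hpre2⟩ := hpre
  unfold Spec_minimumTimeToInitialState
  simp only [minimumTimeToInitialState, minimumTimeToInitialState_alt]
  set w := word.toList with hw
  set n : Int := (w.length : Int) with hn
  set fd := PySem.Int.floordiv (n - 1) k with hfddef
  have hfd := PySem.Int.floordiv_mul_add_mod (n - 1) k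
  by_cases hk : 1 ≤ k
  · apply loops_eq
    intro res hres
    rw [PySem.List.mem_pyRange_one] at hres
    obtain ⟨hr1, hr2⟩ := hres
    have hmod := PySem.Int.mod_nonneg (n - 1) (by omega : (0:Int) < k)
    refine ⟨hr1, ?_, ?_⟩
    · have h1 : (1 : Int) * 1 ≤ res * k :=
        mul_le_mul hr1 hk (by omega) (by omega)
      linarith
    · have hres_fd : res ≤ fd := by omega
      have h1 : res * k ≤ fd * k := mul_le_mul_of_nonneg_right hres_fd (by omega)
      linarith
  · have hk' : k ≤ -1 := by omega
    have hmod := PySem.Int.mod_neg_bounds (n - 1) (by omega : k < 0)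
    have hn0 : (0 : Int) ≤ n := by simp [hn]
    have hfd_le : fd ≤ 0 := by
      by_cases hn1 : 1 ≤ n
      · by_contra hpos
        push Not at hpos
        have h1 : fd * k ≤ fd * (-1) := mul_le_mul_of_nonneg_left hk' (by omega)
        have h2 : fd * (-1) = -fd := by ring
        linarith [hmod.2]
      · have hne : k ≤ -2 := by
          rcases hpre2 with h | h
          · exfalso
            apply h
            have hz : w.length = 0 := by omega
            exact List.length_eq_zero_iff.mp hz
          · omega
        by_contra hpos
        push Not at hpos
        have h1 : fd * k ≤ 1 * k := mul_le_mul_of_nonpos_right (by omega) (by omega)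
        have hn0' : n = 0 := by omega
        linarith [hmod.1, hmod.2]
    rw [PySem.List.pyRange_one_eq_nil (by omega)]
    rfl

@[simp]
theorem minimumTimeToInitialState_raises : Claim_raises_minimumTimeToInitialState := by
  unfold Claim_raises_minimumTimeToInitialState
  constructor
  · intro word k _ hr
    unfold Raises_minimumTimeToInitialState at hr
    rintro ⟨hk0, h | h⟩
    · exact h hr.1
    · exact h hr.2
  · exact ⟨by decide, by decide, by decide⟩
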